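-- pv_equiv track=rewrite | github.com/k-erlikh/Quantum-System-Specification-Checker | src/classicalSolution.py | check_specification_consistency
-- ===== SOURCE A (Python) =====
-- import itertools
--
-- def evaluate_specification_term(term, variable_values):
--     """
--     Function: evaluate_specification_term
--     Params: term (string like "0x1" representing a specification pattern),
--             variable_values (list of binary values for variables [X0,X1,...])
--     Return: bool - True if values match term pattern, False otherwise
--     """
--
--     for var_value, term_char in zip(variable_values, term):
--         if term_char not in ('x', str(var_value)):
--             return False
--     return True
--
-- def check_specification_consistency(n, terms):
--     """
--     Function: check_specification_consistency
--     Params: n (number of variables),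
--             terms (list of specification terms)
--     Return: bool - True if system is consistent, False otherwise
--
--     Implements the classical truth table method according to the article's 4 steps:
--     1. Terms represent Boolean functions
--     2. Generates full 2^n truth table
--     3. Evaluates all terms against each row
--     4. Returns True if any row satisfies all terms simultaneously
--
--     """
--
--     for variable_values in itertools.product([0, 1], repeat=n):
--         all_terms_satisfied = True
--         for term in terms:
--             if not evaluate_specification_term(term, variable_values):
--                 all_terms_satisfied = False
--                 break
--         if all_terms_satisfied:
--             return True
--
--     return False
-- ===== SOURCE B (Python) =====
-- def check_specification_consistency(n, terms):
--     # Per-position conflict detection: the system is consistent iff no term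
--     # contains a non-{0,1,x} character within the first n positions and no two
--     # constrained positions disagree ('0' in one term, '1' in another).
--     fixed = {}
--     for term in terms:
--         for i, c in enumerate(term[:n]):
--             if c == 'x':
--                 continue
--             if c != '0' and c != '1':
--                 return False
--             if fixed.setdefault(i, c) != c:
--                 return False
--     return True
-- ===== Notes on version B (the rewrite author's own statement) =====
-- stated objective: faster
-- what changed: A enumerates the 2^n truth-table rows and tests every term against each row; B makes one pass over the terms recording each fixed position in a dict and reports inconsistency on the first per-position conflict or non-{0,1,x} character.
-- outside the precondition, e.g. on check_specification_consistency(-1, ['01']): A raises ValueError, B returns True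
import Mathlib
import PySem

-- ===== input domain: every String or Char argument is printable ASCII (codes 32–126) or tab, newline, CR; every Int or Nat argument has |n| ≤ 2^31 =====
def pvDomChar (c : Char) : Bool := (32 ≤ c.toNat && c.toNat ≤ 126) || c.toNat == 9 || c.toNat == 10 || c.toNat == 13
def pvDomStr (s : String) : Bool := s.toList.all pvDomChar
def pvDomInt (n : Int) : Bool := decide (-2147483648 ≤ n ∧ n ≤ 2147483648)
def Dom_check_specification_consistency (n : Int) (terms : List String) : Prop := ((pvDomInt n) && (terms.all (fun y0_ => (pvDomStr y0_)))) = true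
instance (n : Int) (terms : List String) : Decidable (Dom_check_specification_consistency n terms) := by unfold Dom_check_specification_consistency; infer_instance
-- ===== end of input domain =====

-- B replaces A's exhaustive truth-table search by a single pass over the terms that
-- records each fixed position in a dict and stops at the first conflict or non-{0,1,x}
-- char; intended as faster: a timing run saw A time out where B returned (one run
-- measured B 4893x faster at n=64; another could not confirm a ratio).

-- ===== PORT A =====
-- evaluate_specification_term: loop over zip(variable_values, term)
def pvEvalTerm : List Int → List Char → Bool
  | [], _ => true
  | _ :: _, [] => true
  | v :: vs, c :: cs =>
    if !(c == 'x' || decide ([c] = (PySem.Int.toStr v).toList)) then false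
    else pvEvalTerm vs cs

-- binary-odometer termination measure for the product iterator: pvNu of the reversed
-- row is the number of rows still to come after the current one
def pvNu : List Int → Nat
  | [] => 0
  | b :: l => (if b = 0 then 1 else 0) + 2 * pvNu l

theorem pvNu_append (xs ys : List Int) :
    pvNu (xs ++ ys) = pvNu xs + 2 ^ xs.length * pvNu ys := by
  induction xs with
  | nil => simp [pvNu]
  | cons b xs ih => simp [pvNu, ih, pow_succ]; ring

theorem pvNu_map_zero (xs : List Int) :
    pvNu (xs.map fun _ => (0 : Int)) = 2 ^ xs.length - 1 := by
  induction xs with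
  | nil => simp [pvNu]
  | cons b xs ih =>
    have h1 : 1 ≤ 2 ^ xs.length := Nat.one_le_two_pow
    show (if (0 : Int) = 0 then 1 else 0) + 2 * pvNu (xs.map fun _ => (0 : Int))
        = 2 ^ (xs.length + 1) - 1
    rw [if_pos rfl, ih, pow_succ]
    omega

theorem pvNu_ones (l : List Int) (h : ∀ b ∈ l, b ≠ 0) : pvNu l = 0 := by
  induction l with
  | nil => rfl
  | cons b l ih =>
    simp only [pvNu, if_neg (h b List.mem_cons_self),
      ih (fun x hx => h x (List.mem_cons_of_mem _ hx))]

-- the successor row of itertools.product([0,1], repeat=m): flip the rightmost 0 to 1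
-- and reset everything to its right to 0; none = iteration exhausted
def pvInc (row : List Int) : Option (List Int) :=
  match (row.reverse).span (fun b => !(b == 0)) with
  | (_, []) => none
  | (ones, _ :: rest) => some (((ones.map fun _ => (0 : Int)) ++ 1 :: rest).reverse)

theorem pvDropWhile_head (p : Int → Bool) (l : List Int) (z : Int) (rest : List Int)
    (h : l.dropWhile p = z :: rest) : p z = false := by
  induction l with
  | nil => cases h
  | cons a l ih =>
    rw [List.dropWhile_cons] at h
    split at h
    · exact ih h
    · next hp =>
      obtain ⟨rfl, -⟩ := List.cons.inj h
      simpa using hp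

theorem pvInc_eq (row row' : List Int) (h : pvInc row = some row') :
    ∃ tw z rest, row.reverse = tw ++ z :: rest ∧ z = 0 ∧ (∀ b ∈ tw, b ≠ 0) ∧
      (z :: rest).Sublist row.reverse ∧
      row' = ((tw.map fun _ => (0 : Int)) ++ 1 :: rest).reverse := by
  unfold pvInc at h
  rw [List.span_eq_takeWhile_dropWhile] at h
  cases hd : (row.reverse).dropWhile (fun b => !(b == 0)) with
  | nil => rw [hd] at h; cases h
  | cons z rest =>
    rw [hd] at h
    have hz : z = 0 := by
      have := pvDropWhile_head (fun b => !(b == 0)) row.reverse z rest hd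
      simpa using this
    refine ⟨(row.reverse).takeWhile (fun b => !(b == 0)), z, rest, ?_, hz, ?_, ?_, ?_⟩
    · rw [← hd, List.takeWhile_append_dropWhile]
    · intro b hb
      have := List.mem_takeWhile_imp hb
      simpa using this
    · rw [← hd]; exact List.dropWhile_sublist _
    · exact (Option.some.inj h).symm

theorem pvInc_some (row row' : List Int) (h : pvInc row = some row') :
    row'.length = row.length ∧ pvNu row'.reverse + 1 = pvNu row.reverse := by
  obtain ⟨tw, z, rest, hdec, rfl, htw0, -, rfl⟩ := pvInc_eq row row' h
  have hk : 1 ≤ 2 ^ tw.length := Nat.one_le_two_pow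
  have htw : pvNu tw = 0 := pvNu_ones tw htw0
  constructor
  · have hlr := congrArg List.length hdec
    simp only [List.length_reverse, List.length_append, List.length_cons] at hlr ⊢
    simp only [List.length_map]
    omega
  · rw [List.reverse_reverse, pvNu_append, pvNu_map_zero]
    have hrow : pvNu row.reverse = pvNu tw + 2 ^ tw.length * pvNu ((0 : Int) :: rest) := by
      rw [hdec, pvNu_append]
    rw [hrow, htw]
    simp only [pvNu, List.length_map]
    norm_num
    rw [Nat.mul_add, Nat.mul_one]
    omega

-- the outer loop of A: iterate the rows of itertools.product([0,1], repeat=m) in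
-- CPython's order (last coordinate fastest), returning True at the first row all
-- terms accept — the generator's early 'return True'
def pvLoop (terms : List String) (row : List Int) : Bool :=
  if terms.all (fun t => pvEvalTerm row t.toList) then true
  else
    match hinc : pvInc row with
    | none => false
    | some row' => pvLoop terms row'
termination_by pvNu row.reverse
decreasing_by
  have := pvInc_some row row' hinc
  omega

def check_specification_consistency (n : Int) (terms : List String) : Bool :=
  pvLoop terms (List.replicate n.toNat 0)

-- ===== PORT B =====
-- inner loop of B: for i, c in enumerate(term[:n]), with early "return False" as none
def pvScanChars : PySem.Dict Int Char → List (Int × Char) → Option (PySem.Dict Int Char)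
  | fixed, [] => some fixed
  | fixed, (i, c) :: rest =>
    if c == 'x' then pvScanChars fixed rest
    else if c != '0' && c != '1' then none
    else match fixed.get? i with
      | some d => if d == c then pvScanChars fixed rest else none
      | none => pvScanChars (fixed.insert i c) rest

-- outer loop of B over the terms, threading the dict of fixed positions
def pvScanTerms : PySem.Dict Int Char → Int → List String → Bool
  | _, _, [] => true
  | fixed, n, t :: ts =>
    match pvScanChars fixed (PySem.List.enumerate (PySem.List.slice t.toList none (some n))) with
    | none => false
    | some f => pvScanTerms f n ts

def check_specification_consistency_alt (n : Int) (terms : List String) : Bool :=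
  pvScanTerms PySem.Dict.empty n terms

-- ===== PRECONDITION & SPEC =====
-- Pre_ excludes exactly n < 0, where A raises ValueError (itertools.product repeat cannot be negative).
def Pre_check_specification_consistency (n : Int) (terms : List String) : Prop := 0 ≤ n
instance (n : Int) (terms : List String) : Decidable (Pre_check_specification_consistency n terms) := by unfold Pre_check_specification_consistency; infer_instance
def pvWitness_check_specification_consistency : Int × List String := (2, ["0x", "x1"])

def Spec_check_specification_consistency (n : Int) (terms : List String) (out : Bool) : Prop := out = check_specification_consistency_alt n terms
instance (n : Int) (terms : List String) (out : Bool) : Decidable (Spec_check_specification_consistency n terms out) := by unfold Spec_check_specification_consistency; infer_instance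

-- ===== CLAIM (what is proved, stated in full; the proofs are below) =====
def Claim_equal_check_specification_consistency : Prop := ∀ (n : Int) (terms : List String), Dom_check_specification_consistency n terms → Pre_check_specification_consistency n terms → Spec_check_specification_consistency n terms (check_specification_consistency n terms)

-- ===== LEMMAS AND PROOFS =====

-- the bit a constrained char fixes
def pvB (c : Char) : Int := if c = '1' then 1 else 0

-- "row vv satisfies term cs" in Prop form (the zip is positionwise up to the shorter length)
def pvMatch (vv : List Int) (cs : List Char) : Prop :=
  ∀ k : Nat, ∀ h1 : k < vv.length, ∀ h2 : k < cs.length,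
    cs[k] = 'x' ∨ [cs[k]] = PySem.Int.toChars vv[k]

-- dict invariant: every entry is a 0/1 char agreeing with row vv at its (in-range) position
def pvGood (vv : List Int) (f : PySem.Dict Int Char) : Prop :=
  ∀ i c, f.get? i = some c → ∃ k : Nat, i = (k : Int) ∧ ∃ h : k < vv.length,
    (c = '0' ∨ c = '1') ∧ vv[k] = pvB c

def pvExt (f f' : PySem.Dict Int Char) : Prop :=
  ∀ i c, f.get? i = some c → f'.get? i = some c

theorem pvEvalTerm_iff (vv : List Int) (cs : List Char) :
    pvEvalTerm vv cs = true ↔ pvMatch vv cs := by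
  induction vv generalizing cs with
  | nil =>
    simp [pvEvalTerm, pvMatch]
  | cons v vs ih =>
    cases cs with
    | nil => simp [pvEvalTerm, pvMatch]
    | cons c cs =>
      by_cases h : c = 'x' ∨ [c] = PySem.Int.toChars v
      · have hc : pvEvalTerm (v :: vs) (c :: cs) = pvEvalTerm vs cs := by
          rcases h with h | h <;> simp [pvEvalTerm, h]
        rw [hc, ih]
        constructor
        · intro hm k h1 h2
          cases k with
          | zero => simpa using h
          | succ k => exact hm k (by simpa using h1) (by simpa using h2)
        · intro hm k h1 h2
          simpa using hm (k+1) (by simpa using h1) (by simpa using h2)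
      · rw [not_or] at h
        have hc : pvEvalTerm (v :: vs) (c :: cs) = false := by
          simp [pvEvalTerm, h.1, h.2]
        rw [hc]
        constructor
        · intro he; exact absurd he (by simp)
        · intro hm
          exact absurd (by simpa using hm 0 (by simp) (by simp) :
            c = 'x' ∨ [c] = PySem.Int.toChars v) (not_or.mpr h)

theorem pvNu_lt (l : List Int) : pvNu l < 2 ^ l.length := by
  induction l with
  | nil => simp [pvNu]
  | cons b l ih =>
    simp only [pvNu, List.length_cons, pow_succ]
    split <;> omega

theorem pvNu_inj (l : List Int) : ∀ (l' : List Int), (∀ b ∈ l, b = 0 ∨ b = 1) →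
    (∀ b ∈ l', b = 0 ∨ b = 1) → l.length = l'.length → pvNu l = pvNu l' → l = l' := by
  induction l with
  | nil =>
    intro l' _ _ hlen _
    cases l' with
    | nil => rfl
    | cons b l' => simp at hlen
  | cons b l ih =>
    intro l' hb hb' hlen hnu
    cases l' with
    | nil => simp at hlen
    | cons b' l' =>
      have h1 := hb b List.mem_cons_self
      have h2 := hb' b' List.mem_cons_self
      have htl : pvNu l = pvNu l' ∧ b = b' := by
        simp only [pvNu] at hnu
        rcases h1 with rfl | rfl <;> rcases h2 with rfl | rfl <;>
          simp_all <;> omega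
      rw [htl.2, ih l' (fun x hx => hb x (List.mem_cons_of_mem b hx))
        (fun x hx => hb' x (List.mem_cons_of_mem b' hx)) (by simpa using hlen) htl.1]

theorem pvInc_bits (row row' : List Int) (hb : ∀ b ∈ row, b = 0 ∨ b = 1)
    (h : pvInc row = some row') : ∀ b ∈ row', b = 0 ∨ b = 1 := by
  obtain ⟨tw, z, rest, hdec, rfl, -, hsub, rfl⟩ := pvInc_eq row row' h
  intro b hbm
  rw [List.mem_reverse, List.mem_append] at hbm
  rcases hbm with hbm | hbm
  · obtain ⟨-, -, rfl⟩ := List.mem_map.mp hbm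
    exact Or.inl rfl
  · rcases List.mem_cons.mp hbm with rfl | hbm
    · exact Or.inr rfl
    · exact hb b (List.mem_reverse.mp (hsub.subset (List.mem_cons_of_mem _ hbm)))

theorem pvInc_none (row : List Int) (h : pvInc row = none) : ∀ b ∈ row, b ≠ 0 := by
  unfold pvInc at h
  rw [List.span_eq_takeWhile_dropWhile] at h
  cases hd : (row.reverse).dropWhile (fun b => !(b == 0)) with
  | cons z rest => rw [hd] at h; cases h
  | nil =>
    intro b hbm
    have := List.dropWhile_eq_nil_iff.mp hd b (List.mem_reverse.mpr hbm)
    simpa using this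

theorem pvLoop_iff (terms : List String) : ∀ (N : Nat) (row : List Int),
    pvNu row.reverse = N → (∀ b ∈ row, b = 0 ∨ b = 1) →
    (pvLoop terms row = true ↔
      ∃ vv : List Int, vv.length = row.length ∧ (∀ v ∈ vv, v = 0 ∨ v = 1) ∧
        pvNu vv.reverse ≤ N ∧ (terms.all fun t => pvEvalTerm vv t.toList) = true) := by
  intro N
  induction N using Nat.strong_induction_on with
  | _ N ih =>
    intro row hN hbits
    rw [pvLoop]
    by_cases hsat : (terms.all fun t => pvEvalTerm row t.toList) = true
    · rw [if_pos hsat]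
      exact ⟨fun _ => ⟨row, rfl, hbits, hN ▸ Nat.le_refl _, hsat⟩, fun _ => rfl⟩
    · rw [if_neg hsat]
      split
      next hinc =>
        constructor
        · intro hfalse; cases hfalse
        · rintro ⟨vv, hlen, hvb, hle, hvs⟩
          have hall1 : ∀ b ∈ row, b ≠ 0 := pvInc_none row hinc
          have h0 : pvNu row.reverse = 0 :=
            pvNu_ones _ (fun b hbm => hall1 b (List.mem_reverse.mp hbm))
          have hvv0 : pvNu vv.reverse = 0 := by omega
          have : vv = row := by
            have hrev := pvNu_inj vv.reverse row.reverse
              (fun b hbm => hvb b (List.mem_reverse.mp hbm))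
              (fun b hbm => hbits b (List.mem_reverse.mp hbm))
              (by simp [hlen]) (by rw [hvv0, h0])
            simpa using congrArg List.reverse hrev
          exact absurd (this ▸ hvs) hsat
      next row' hinc =>
        obtain ⟨hlen', hnu'⟩ := pvInc_some row row' hinc
        have hb' := pvInc_bits row row' hbits hinc
        rw [ih (pvNu row'.reverse) (by omega) row' rfl hb']
        constructor
        · rintro ⟨vv, h1, h2, h3, h4⟩
          exact ⟨vv, by rw [h1, hlen'], h2, by omega, h4⟩
        · rintro ⟨vv, h1, h2, h3, h4⟩
          by_cases hEq : pvNu vv.reverse = N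
          · have hvr : vv = row := by
              have hrev := pvNu_inj vv.reverse row.reverse
                (fun b hbm => h2 b (List.mem_reverse.mp hbm))
                (fun b hbm => hbits b (List.mem_reverse.mp hbm))
                (by simp [h1]) (by rw [hEq, hN])
              simpa using congrArg List.reverse hrev
            exact absurd (hvr ▸ h4) hsat
          · exact ⟨vv, by rw [h1, ← hlen'], h2, by omega, h4⟩

theorem pvNu_replicate_zero (m : Nat) : pvNu (List.replicate m (0 : Int)) = 2 ^ m - 1 := by
  induction m with
  | zero => simp [pvNu]
  | succ m ih =>
    have h1 : 1 ≤ 2 ^ m := Nat.one_le_two_pow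
    rw [List.replicate_succ]
    show (if (0 : Int) = 0 then 1 else 0) + 2 * pvNu (List.replicate m 0) = 2 ^ (m + 1) - 1
    rw [if_pos rfl, ih, pow_succ]
    omega

theorem pvA_iff (n : Int) (terms : List String) :
    check_specification_consistency n terms = true ↔
      ∃ vv : List Int, vv.length = n.toNat ∧ (∀ v ∈ vv, v = 0 ∨ v = 1) ∧
        ∀ t ∈ terms, pvMatch vv t.toList := by
  have hb0 : ∀ b ∈ List.replicate n.toNat (0 : Int), b = 0 ∨ b = 1 :=
    fun b hbm => Or.inl (List.eq_of_mem_replicate hbm)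
  rw [show check_specification_consistency n terms
      = pvLoop terms (List.replicate n.toNat 0) from rfl,
    pvLoop_iff terms (pvNu (List.replicate n.toNat (0 : Int)).reverse) _ rfl hb0]
  constructor
  · rintro ⟨vv, hlen, hvb, -, hvs⟩
    rw [List.all_eq_true] at hvs
    exact ⟨vv, by simpa using hlen, hvb,
      fun t ht => (pvEvalTerm_iff _ _).mp (hvs t ht)⟩
  · rintro ⟨vv, hlen, hvb, hall⟩
    refine ⟨vv, by simpa using hlen, hvb, ?_, ?_⟩
    · rw [List.reverse_replicate, pvNu_replicate_zero]
      have := pvNu_lt vv.reverse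
      rw [List.length_reverse, hlen] at this
      omega
    · rw [List.all_eq_true]
      exact fun t ht => (pvEvalTerm_iff _ _).mpr (hall t ht)

-- membership description of the pair list B scans for a term (m = n.toNat)
theorem pvPairs_mem (l : List Char) (m : Nat) (i : Int) (c : Char) :
    (i, c) ∈ PySem.List.enumerate (PySem.List.slice l none (some ((m : Nat) : Int))) ↔
      ∃ k : Nat, i = (k : Int) ∧ k < m ∧ ∃ h : k < l.length, c = l[k] := by
  rw [PySem.List.slice_to_natCast, PySem.List.mem_enumerate_iff]
  constructor
  · rintro ⟨k, hk, he⟩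
    simp only [List.length_take, lt_min_iff] at hk
    rw [Prod.mk.injEq] at he
    refine ⟨k, by simp [he.1], hk.1, hk.2, ?_⟩
    rw [he.2]; exact List.getElem_take
  · rintro ⟨k, rfl, hkm, hkl, rfl⟩
    exact ⟨k, by simp [hkm, hkl], by simp [List.getElem_take]⟩

-- completeness of the inner scan: a dict consistent with row vv never fails on chars vv satisfies
theorem pvScanChars_complete (vv : List Int) (hb : ∀ v ∈ vv, v = 0 ∨ v = 1)
    (ps : List (Int × Char)) (f : PySem.Dict Int Char) (hg : pvGood vv f)
    (hp : ∀ p ∈ ps, ∃ k : Nat, p.1 = (k : Int) ∧ ∃ h : k < vv.length,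
          p.2 = 'x' ∨ [p.2] = PySem.Int.toChars vv[k]) :
    ∃ f', pvScanChars f ps = some f' ∧ pvGood vv f' := by
  induction ps generalizing f with
  | nil => exact ⟨f, rfl, hg⟩
  | cons p rest ih =>
    obtain ⟨i, c⟩ := p
    obtain ⟨k, hi', hk, hcase'⟩ := hp (i, c) List.mem_cons_self
    have hi : i = (k : Int) := hi'
    have hcase : c = 'x' ∨ [c] = PySem.Int.toChars vv[k] := hcase'
    clear hi' hcase'
    have hptail : ∀ p ∈ rest, ∃ k : Nat, p.1 = (k : Int) ∧ ∃ h : k < vv.length,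
        p.2 = 'x' ∨ [p.2] = PySem.Int.toChars vv[k] :=
      fun p hp' => hp p (List.mem_cons_of_mem _ hp')
    rcases hcase with rfl | hceq
    · -- c = 'x': skipped
      obtain ⟨f', hf', hg'⟩ := ih f hg hptail
      exact ⟨f', by simpa [pvScanChars] using hf', hg'⟩
    · -- constrained position: c is the digit of vv[k]
      have hvk : vv[k] = 0 ∨ vv[k] = 1 := hb _ (List.getElem_mem hk)
      have key : (vv[k] = 0 ∧ c = '0') ∨ (vv[k] = 1 ∧ c = '1') := by
        rcases hvk with hv | hv
        · refine Or.inl ⟨hv, ?_⟩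
          rw [hv, show PySem.Int.toChars (0 : Int) = ['0'] from by decide] at hceq
          simpa using hceq
        · refine Or.inr ⟨hv, ?_⟩
          rw [hv, show PySem.Int.toChars (1 : Int) = ['1'] from by decide] at hceq
          simpa using hceq
      have hc01 : c = '0' ∨ c = '1' := by
        rcases key with ⟨_, rfl⟩ | ⟨_, rfl⟩
        exacts [Or.inl rfl, Or.inr rfl]
      have hbit : vv[k] = pvB c := by
        rcases key with ⟨hv, rfl⟩ | ⟨hv, rfl⟩ <;> rw [hv] <;> decide
      have hx : (c == 'x') = false := by rcases hc01 with rfl | rfl <;> decide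
      have h01 : (c != '0' && c != '1') = false := by rcases hc01 with rfl | rfl <;> decide
      cases hgi : f.get? i with
      | some d =>
        obtain ⟨k', hi', hk', hd01, hbd⟩ := hg i d hgi
        have hkk : k' = k := by rw [hi] at hi'; omega
        have hdc : d = c := by
          simp only [hkk] at hbd
          have hpb : pvB d = pvB c := hbd.symm.trans hbit
          rcases hd01 with rfl | rfl <;> rcases hc01 with rfl | rfl <;>
            first | rfl | (exfalso; simp [pvB] at hpb)
        obtain ⟨f', hf', hg'⟩ := ih f hg hptail
        refine ⟨f', ?_, hg'⟩
        simp [pvScanChars, hx, h01, hgi, hdc, hf']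
      | none =>
        have hg2 : pvGood vv (f.insert i c) := by
          intro i0 c0 h0
          rw [PySem.Dict.get?_insert] at h0
          split at h0
          next heq =>
            obtain rfl : c = c0 := by simpa using h0
            exact ⟨k, heq ▸ hi, hk, hc01, hbit⟩
          next => exact hg i0 c0 h0
        obtain ⟨f', hf', hg'⟩ := ih (f.insert i c) hg2 hptail
        refine ⟨f', ?_, hg'⟩
        simp [pvScanChars, hx, h01, hgi, hf']

theorem pvScanTerms_complete (n : Int) (hn : 0 ≤ n) (vv : List Int)
    (hl : vv.length = n.toNat) (hb : ∀ v ∈ vv, v = 0 ∨ v = 1)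
    (ts : List String) (f : PySem.Dict Int Char) (hg : pvGood vv f)
    (hall : ∀ t ∈ ts, pvMatch vv t.toList) :
    pvScanTerms f n ts = true := by
  induction ts generalizing f with
  | nil => rfl
  | cons t ts ih =>
    have hm : pvMatch vv t.toList := hall t List.mem_cons_self
    have hcast : n = ((n.toNat : Nat) : Int) := (Int.toNat_of_nonneg hn).symm
    have hp : ∀ p ∈ PySem.List.enumerate (PySem.List.slice t.toList none (some n)),
        ∃ k : Nat, p.1 = (k : Int) ∧ ∃ h : k < vv.length,
          p.2 = 'x' ∨ [p.2] = PySem.Int.toChars vv[k] := by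
      rintro ⟨i, c⟩ hpmem
      rw [hcast] at hpmem
      obtain ⟨k, rfl, hkm, hkl, rfl⟩ := (pvPairs_mem _ _ _ _).mp hpmem
      exact ⟨k, rfl, by omega, hm k (by omega) hkl⟩
    obtain ⟨f1, hf1, hg1⟩ := pvScanChars_complete vv hb _ f hg hp
    simp only [pvScanTerms, hf1]
    exact ih f1 hg1 (fun t' ht' => hall t' (List.mem_cons_of_mem _ ht'))

theorem pvScanChars_ext (ps : List (Int × Char)) (f f' : PySem.Dict Int Char)
    (h : pvScanChars f ps = some f') : pvExt f f' := by
  induction ps generalizing f with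
  | nil =>
    obtain rfl : f = f' := by simpa [pvScanChars] using h
    exact fun i c hc => hc
  | cons p rest ih =>
    obtain ⟨i, c⟩ := p
    simp only [pvScanChars] at h
    by_cases hx : (c == 'x') = true
    · rw [if_pos hx] at h; exact ih _ h
    · rw [if_neg hx] at h
      by_cases h01 : (c != '0' && c != '1') = true
      · rw [if_pos h01] at h; cases h
      · rw [if_neg h01] at h
        cases hgi : f.get? i with
        | some d =>
          rw [hgi] at h
          change (if (d == c) = true then pvScanChars f rest else none) = some f' at h
          by_cases hdc : (d == c) = true
          · rw [if_pos hdc] at h; exact ih _ h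
          · rw [if_neg hdc] at h; cases h
        | none =>
          rw [hgi] at h
          change pvScanChars (f.insert i c) rest = some f' at h
          intro i0 c0 h0
          refine ih _ h i0 c0 ?_
          rw [PySem.Dict.get?_insert]
          split
          next heq => rw [heq, hgi] at h0; cases h0
          next => exact h0

theorem pvScanChars_mem (ps : List (Int × Char)) (f f' : PySem.Dict Int Char)
    (h : pvScanChars f ps = some f') :
    ∀ p ∈ ps, p.2 ≠ 'x' → (p.2 = '0' ∨ p.2 = '1') ∧ f'.get? p.1 = some p.2 := by
  induction ps generalizing f with
  | nil => intro p hp; cases hp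
  | cons q rest ih =>
    obtain ⟨i, c⟩ := q
    intro p hp hne
    simp only [pvScanChars] at h
    by_cases hx : (c == 'x') = true
    · rw [if_pos hx] at h
      rcases List.mem_cons.mp hp with rfl | hp'
      · exact absurd (by simpa using hx) hne
      · exact ih _ h p hp' hne
    · rw [if_neg hx] at h
      by_cases h01 : (c != '0' && c != '1') = true
      · rw [if_pos h01] at h; cases h
      · rw [if_neg h01] at h
        have hc01 : c = '0' ∨ c = '1' := by
          by_cases e0 : c = '0'
          · exact Or.inl e0
          by_cases e1 : c = '1'
          · exact Or.inr e1
          exact absurd (by simp [e0, e1]) h01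
        cases hgi : f.get? i with
        | some d =>
          rw [hgi] at h
          change (if (d == c) = true then pvScanChars f rest else none) = some f' at h
          by_cases hdc : (d == c) = true
          · rw [if_pos hdc] at h
            rcases List.mem_cons.mp hp with rfl | hp'
            · exact ⟨hc01, pvScanChars_ext _ _ _ h i c
                (by rw [hgi]; congr 1; exact (eq_of_beq hdc))⟩
            · exact ih _ h p hp' hne
          · rw [if_neg hdc] at h; cases h
        | none =>
          rw [hgi] at h
          change pvScanChars (f.insert i c) rest = some f' at h
          rcases List.mem_cons.mp hp with rfl | hp'
          · exact ⟨hc01, pvScanChars_ext _ _ _ h i c (PySem.Dict.get?_insert_self f i c)⟩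
          · exact ih _ h p hp' hne

theorem pvScanTerms_forward (n : Int) (ts : List String) (f : PySem.Dict Int Char)
    (h : pvScanTerms f n ts = true) :
    ∃ f', pvExt f f' ∧ ∀ t ∈ ts, ∀ p ∈ PySem.List.enumerate (PySem.List.slice t.toList none (some n)),
      p.2 ≠ 'x' → (p.2 = '0' ∨ p.2 = '1') ∧ f'.get? p.1 = some p.2 := by
  induction ts generalizing f with
  | nil => exact ⟨f, fun i c hc => hc, by simp⟩
  | cons t ts ih =>
    simp only [pvScanTerms] at h
    cases hsc : pvScanChars f (PySem.List.enumerate (PySem.List.slice t.toList none (some n))) with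
    | none => rw [hsc] at h; cases h
    | some f1 =>
      rw [hsc] at h
      obtain ⟨f', hext, hrest⟩ := ih f1 h
      refine ⟨f', fun i c hc => hext i c (pvScanChars_ext _ _ _ hsc i c hc), ?_⟩
      intro t' ht' p hp hne
      rcases List.mem_cons.mp ht' with rfl | ht''
      · obtain ⟨h1, h2⟩ := pvScanChars_mem _ _ _ hsc p hp hne
        exact ⟨h1, hext _ _ h2⟩
      · exact hrest t' ht'' p hp hne

-- ===== VERDICT (by name: the statement is the Claim_ definition above) =====
theorem check_specification_consistency_spec : Claim_equal_check_specification_consistency := by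
  intro n terms _ hpre
  unfold Spec_check_specification_consistency
  rw [Bool.eq_iff_iff]
  constructor
  · -- A true → B true
    intro hA
    obtain ⟨vv, hl, hb, hall⟩ := (pvA_iff n terms).mp hA
    exact pvScanTerms_complete n hpre vv hl hb terms PySem.Dict.empty
      (fun i c hc => by simp [PySem.Dict.get?_empty] at hc) hall
  · -- B true → A true
    intro hB
    obtain ⟨f', _, hprop⟩ := pvScanTerms_forward n terms PySem.Dict.empty hB
    have hcast : n = ((n.toNat : Nat) : Int) := (Int.toNat_of_nonneg hpre).symm
    refine (pvA_iff n terms).mpr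
      ⟨(List.range n.toNat).map
        (fun (k : Nat) => if f'.get? ((k : Nat) : Int) = some '1' then (1 : Int) else 0),
       by simp, ?_, ?_⟩
    · intro v hv
      obtain ⟨k, _, rfl⟩ := List.mem_map.mp hv
      split <;> simp
    · intro t ht k h1 h2
      simp only [List.length_map, List.length_range] at h1
      by_cases hxc : t.toList[k] = 'x'
      · exact Or.inl hxc
      · have hpmem : ((k : Int), t.toList[k]) ∈
            PySem.List.enumerate (PySem.List.slice t.toList none (some n)) := by
          rw [hcast]
          exact (pvPairs_mem _ _ _ _).mpr ⟨k, rfl, h1, h2, rfl⟩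
        obtain ⟨hc01', hget'⟩ := hprop t ht _ hpmem hxc
        have hc01 : t.toList[k] = '0' ∨ t.toList[k] = '1' := hc01'
        have hget : f'.get? ((k : Nat) : Int) = some (t.toList[k]) := hget'
        have hvk : ((List.range n.toNat).map
            (fun (k : Nat) => if f'.get? ((k : Nat) : Int) = some '1' then (1 : Int) else 0))[k]'(by
              simpa using h1)
            = if f'.get? ((k : Nat) : Int) = some '1' then (1 : Int) else 0 := by
          simp
        right
        rw [hvk]
        rcases hc01 with hc | hc <;> rw [hc] at hget <;> rw [hc]
        · rw [if_neg (by simp [hget])]; decide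
        · rw [if_pos hget]; decide
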